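-- pv_equiv track=rewrite | github.com/kaurmanpreet26/vector_db_backend | app/db/vector_db.py | _is_generic_query
-- ===== SOURCE A (Python) =====
-- def _is_generic_query(query_text: str) -> bool:
--     """
--     Check if the query is a generic greeting or small talk.
--
--     Args:
--         query_text: The query text to check
--
--     Returns:
--         True if the query is generic, False otherwise
--     """
--     generic_queries = [
--         # Basic greetings
--         "hi", "hello", "hey", "hiya", "yo",
--         "hi there", "hello there", "hey there",
--
--         # Time-based greetings
--         "good morning", "good afternoon", "good evening",
--         "morning", "afternoon", "evening",
--
--         # How are you variations
--         "how are you", "how's it going", "how's everything",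
--         "how are you doing", "how have you been",
--         "how's your day", "how's your day going",
--         "how's life", "how's everything going",
--
--         # What's up variations
--         "what's up", "whats up", "what's new",
--         "what's happening", "what's going on",
--         "what's the latest", "what's new with you",
--
--         # Formal greetings
--         "greetings", "salutations", "how do you do",
--         "pleased to meet you", "nice to meet you",
--
--         # Small talk
--         "how's the weather", "nice weather", "beautiful day",
--         "how's your weekend", "how was your weekend",
--         "how's your week", "how was your week",
--
--         # Thank you variations
--         "thanks", "thank you", "thanks a lot",
--         "thank you so much", "appreciate it",
--
--         # Goodbye variations
--         "bye", "goodbye", "see you", "see you later",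
--         "take care", "have a good day", "have a nice day",
--
--         # Polite responses
--         "you're welcome", "no problem", "anytime",
--         "my pleasure", "don't mention it",
--
--         # Help requests
--         "can you help me", "i need help", "help me",
--         "i have a question", "i need assistance"
--     ]
--
--     query_lower = query_text.lower().strip()
--     return any(greeting in query_lower for greeting in generic_queries)
-- ===== SOURCE B (Python) =====
-- _GENERIC_CSV = (
--     "hi,hello,hey,hiya,yo,hi there,hello there,hey there,"
--     "good morning,good afternoon,good evening,morning,afternoon,evening,"
--     "how are you,how's it going,how's everything,how are you doing,"
--     "how have you been,how's your day,how's your day going,how's life,"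
--     "how's everything going,what's up,whats up,what's new,what's happening,"
--     "what's going on,what's the latest,what's new with you,greetings,"
--     "salutations,how do you do,pleased to meet you,nice to meet you,"
--     "how's the weather,nice weather,beautiful day,how's your weekend,"
--     "how was your weekend,how's your week,how was your week,thanks,"
--     "thank you,thanks a lot,thank you so much,appreciate it,bye,goodbye,"
--     "see you,see you later,take care,have a good day,have a nice day,"
--     "you're welcome,no problem,anytime,my pleasure,don't mention it,"
--     "can you help me,i need help,help me,i have a question,i need assistance"
-- )
--
-- _GENERIC = frozenset(_GENERIC_CSV.split(","))
-- _WINDOW_LENGTHS = sorted({len(p) for p in _GENERIC})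
--
--
-- def _is_generic_query(query_text: str) -> bool:
--     """
--     Check if the query is a generic greeting or small talk.
--
--     Slides windows of the phrase lengths over the normalised query and
--     tests each window against a precomputed frozenset of phrases, so a
--     phrase is found exactly when one window equals it.
--     """
--     query_lower = query_text.lower().strip()
--     n = len(query_lower)
--     return any(query_lower[i:i + length] in _GENERIC
--                for i in range(n)
--                for length in _WINDOW_LENGTHS
--                if i + length <= n)
-- ===== Notes on version B (the rewrite author's own statement) =====
-- stated objective: alternative
-- what changed: Replaces A's per-phrase substring loop ('greeting in q' for each of 64 phrases) by sliding windows of the distinct phrase lengths over the query and testing each window for membership in a precomputed frozenset of phrases; the phrase table is kept as one comma-separated string split once at import.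
import Mathlib
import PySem

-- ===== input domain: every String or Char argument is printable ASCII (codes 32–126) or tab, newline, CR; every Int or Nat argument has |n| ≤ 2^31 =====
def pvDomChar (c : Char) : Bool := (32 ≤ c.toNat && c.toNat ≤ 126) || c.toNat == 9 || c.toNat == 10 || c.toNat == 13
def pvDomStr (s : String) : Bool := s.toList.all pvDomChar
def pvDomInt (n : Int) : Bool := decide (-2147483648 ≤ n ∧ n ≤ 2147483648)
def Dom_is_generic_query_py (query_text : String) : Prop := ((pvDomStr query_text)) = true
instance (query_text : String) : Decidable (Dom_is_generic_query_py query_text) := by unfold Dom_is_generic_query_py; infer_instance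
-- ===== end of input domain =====

-- B replaces A's per-phrase substring loop by sliding windows of the distinct phrase
-- lengths over the query and testing each window against a set of the phrases
-- (objective: alternative; similar cost, different algorithm).

-- ===== PORT A =====
def pvGenericQueries : List String :=
  ["hi",
   "hello",
   "hey",
   "hiya",
   "yo",
   "hi there",
   "hello there",
   "hey there",
   "good morning",
   "good afternoon",
   "good evening",
   "morning",
   "afternoon",
   "evening",
   "how are you",
   "how's it going",
   "how's everything",
   "how are you doing",
   "how have you been",
   "how's your day",
   "how's your day going",
   "how's life",
   "how's everything going",
   "what's up",
   "whats up",
   "what's new",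
   "what's happening",
   "what's going on",
   "what's the latest",
   "what's new with you",
   "greetings",
   "salutations",
   "how do you do",
   "pleased to meet you",
   "nice to meet you",
   "how's the weather",
   "nice weather",
   "beautiful day",
   "how's your weekend",
   "how was your weekend",
   "how's your week",
   "how was your week",
   "thanks",
   "thank you",
   "thanks a lot",
   "thank you so much",
   "appreciate it",
   "bye",
   "goodbye",
   "see you",
   "see you later",
   "take care",
   "have a good day",
   "have a nice day",
   "you're welcome",
   "no problem",
   "anytime",
   "my pleasure",
   "don't mention it",
   "can you help me",
   "i need help",
   "help me",
   "i have a question",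
   "i need assistance"]

-- query_lower = query_text.lower().strip(); any(greeting in query_lower for greeting in generic_queries)
def is_generic_query_py (query_text : String) : Bool :=
  let query_lower := PySem.Str.strip (PySem.Str.lower query_text)
  pvGenericQueries.any (fun greeting => PySem.Str.isIn greeting query_lower)

-- ===== PORT B =====
-- _GENERIC_CSV: the comma-separated phrase table (adjacent string literals → ++)
def pvGenericCsvChars : List Char :=
  "hi,hello,hey,hiya,yo,hi there,hello there,hey there,".toList ++
    "good morning,good afternoon,good evening,morning,afternoon,evening,".toList ++
    "how are you,how's it going,how's everything,how are you doing,".toList ++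
    "how have you been,how's your day,how's your day going,how's life,".toList ++
    "how's everything going,what's up,whats up,what's new,what's happening,".toList ++
    "what's going on,what's the latest,what's new with you,greetings,".toList ++
    "salutations,how do you do,pleased to meet you,nice to meet you,".toList ++
    "how's the weather,nice weather,beautiful day,how's your weekend,".toList ++
    "how was your weekend,how's your week,how was your week,thanks,".toList ++
    "thank you,thanks a lot,thank you so much,appreciate it,bye,goodbye,".toList ++
    "see you,see you later,take care,have a good day,have a nice day,".toList ++
    "you're welcome,no problem,anytime,my pleasure,don't mention it,".toList ++
    "can you help me,i need help,help me,i have a question,i need assistance".toList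

-- _GENERIC_CSV.split(",")
def pvPhrases : List (List Char) := PySem.Chars.splitOn pvGenericCsvChars [',']

-- _GENERIC = frozenset(_GENERIC_CSV.split(","))
def pvGeneric : PySem.Set (List Char) := PySem.Set.ofList pvPhrases

-- _WINDOW_LENGTHS = sorted({len(p) for p in _GENERIC})
def pvWindowLengths : List Int :=
  PySem.List.sorted (PySem.Set.ofList (pvGeneric.map PySem.List.len)) (fun x => x) false

-- any(query_lower[i:i+length] in _GENERIC for i in range(n) for length in _WINDOW_LENGTHS if i + length <= n)
def is_generic_query_py_alt (query_text : String) : Bool :=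
  let query_lower := PySem.Chars.strip (PySem.Chars.lower query_text.toList)
  let n : Int := PySem.List.len query_lower
  (PySem.List.pyRange 0 n 1).any (fun i =>
    pvWindowLengths.any (fun length =>
      decide (i + length ≤ n) &&
        pvGeneric.contains (PySem.List.slice query_lower (some i) (some (i + length)))))

-- ===== PRECONDITION & SPEC =====
def Spec_is_generic_query_py (query_text : String) (out : Bool) : Prop := out = is_generic_query_py_alt query_text
instance (query_text : String) (out : Bool) : Decidable (Spec_is_generic_query_py query_text out) := by unfold Spec_is_generic_query_py; infer_instance

-- ===== CLAIM (what is proved, stated in full; the proofs are below) =====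
def Claim_equal_is_generic_query_py : Prop := ∀ (query_text : String), Dom_is_generic_query_py query_text → Spec_is_generic_query_py query_text (is_generic_query_py query_text)

-- ===== LEMMAS AND PROOFS =====

set_option maxRecDepth 1000000 in
set_option maxHeartbeats 2000000 in
lemma pvMap : pvGenericQueries.map String.toList = pvPhrases := by decide

set_option maxRecDepth 1000000 in
set_option maxHeartbeats 2000000 in
lemma pvLens : pvWindowLengths = [2, 3, 4, 5, 6, 7, 8, 9, 10, 11, 12, 13, 14, 15, 16, 17, 18, 19, 20, 22] := by decide

lemma pvPhraseFacts : ∀ p ∈ pvPhrases, p ≠ [] ∧ ((p.length : Int) ∈ pvWindowLengths) := by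
  simp only [← pvMap, pvLens]
  decide

lemma pvLenPos : ∀ L ∈ pvWindowLengths, 0 < L := by
  rw [pvLens]; decide

lemma pv_main (ql : List Char) :
    pvGenericQueries.any (fun g => PySem.Chars.isIn g.toList ql)
      = (PySem.List.pyRange 0 (PySem.List.len ql) 1).any (fun i =>
          pvWindowLengths.any (fun L =>
            decide (i + L ≤ PySem.List.len ql) &&
              pvGeneric.contains (PySem.List.slice ql (some i) (some (i + L))))) := by
  rw [Bool.eq_iff_iff]
  simp only [List.any_eq_true, Bool.and_eq_true, decide_eq_true_eq,
    PySem.List.mem_pyRange_one, PySem.List.len_eq, PySem.Set.contains_iff,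
    pvGeneric, PySem.Set.mem_ofList]
  constructor
  · rintro ⟨g, hg, hin⟩
    have hp : g.toList ∈ pvPhrases := pvMap ▸ List.mem_map_of_mem hg
    obtain ⟨hne, hlen⟩ := pvPhraseFacts _ hp
    obtain ⟨j, t, ht⟩ : ∃ j t, g.toList ++ t = ql.drop j := by
      obtain ⟨j, hj⟩ := (PySem.Chars.exists_prefix_drop_iff_isIn g.toList ql).mpr hin
      exact ⟨j, hj.choose, hj.choose_spec⟩
    have hgl : 0 < g.toList.length := List.length_pos_iff.mpr hne
    have hlen2 : j + g.toList.length ≤ ql.length := by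
      have hpre : g.toList <+: ql.drop j := ⟨t, ht⟩
      have h1 := hpre.length_le
      rw [List.length_drop] at h1
      omega
    refine ⟨(j : Int), ⟨by positivity, by exact_mod_cast (by omega : j < ql.length)⟩,
      (g.toList.length : Int), hlen, by exact_mod_cast hlen2, ?_⟩
    rw [PySem.List.slice_natCast_add, ← ht, List.take_left]
    exact hp
  · rintro ⟨i, ⟨h0, hin⟩, L, hL, hle, hmem⟩
    have hLpos := pvLenPos _ hL
    obtain ⟨g, hg, hgeq⟩ : ∃ g ∈ pvGenericQueries, g.toList = PySem.List.slice ql (some i) (some (i + L)) := by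
      have := pvMap ▸ hmem
      obtain ⟨g, hg, hgeq⟩ := List.mem_map.mp this
      exact ⟨g, hg, hgeq⟩
    refine ⟨g, hg, ?_⟩
    rw [PySem.Chars.isIn_iff_infix, hgeq,
      PySem.List.slice_toNat ql h0 (by omega : (0:Int) ≤ i + L)]
    exact ((ql.drop i.toNat).take_prefix _).isInfix.trans (ql.drop_suffix i.toNat).isInfix

-- ===== VERDICT (by name: the statement is the Claim_ definition above) =====
theorem is_generic_query_py_spec : Claim_equal_is_generic_query_py := by
  intro query_text _
  unfold Spec_is_generic_query_py is_generic_query_py is_generic_query_py_alt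
  have := pv_main (PySem.Chars.strip (PySem.Chars.lower query_text.toList))
  simpa [PySem.Str.isIn, PySem.Str.strip, PySem.Str.lower] using this
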